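-- pv_equiv track=rewrite | github.com/cristian-pulido/NDE_NARRATIVES_ANALYSIS | src/nde_narratives/preprocessing_translate.py | _dominant_language
-- ===== SOURCE A (Python) =====
-- def _dominant_language(values: list[str]) -> str:
--     cleaned = [value.strip() for value in values if value and value.strip()]
--     if not cleaned:
--         return "unknown"
--     counts: dict[str, int] = {}
--     for lang in cleaned:
--         counts[lang] = counts.get(lang, 0) + 1
--     return sorted(counts.items(), key=lambda item: (-item[1], item[0]))[0][0]
-- ===== SOURCE B (Python) =====
-- def _dominant_language(values: list[str]) -> str:
--     # Build the cleaned list with an explicit accumulator loop.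
--     cleaned = []
--     for value in values:
--         s = value.strip()
--         if s:
--             cleaned.append(s)
--     # No dict, no sort: one best-so-far scan over the occurrences themselves,
--     # pairing each occurrence with its total count via list.count.
--     best = None
--     best_count = 0
--     for lang in cleaned:
--         c = cleaned.count(lang)
--         if best is None or best_count < c or (c == best_count and lang < best):
--             best, best_count = lang, c
--     return "unknown" if best is None else best
-- ===== Notes on version B (the rewrite author's own statement) =====
-- stated objective: alternative
-- what changed: B drops both the counts dict and the sort of items: it scans the cleaned occurrences directly, pairing each occurrence with list.count, and keeps a best-so-far (highest count, ties by alphabetically smallest name), trading the O(n + k log k) dict+sort for a dict-free O(n^2) scan.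
import Mathlib
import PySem

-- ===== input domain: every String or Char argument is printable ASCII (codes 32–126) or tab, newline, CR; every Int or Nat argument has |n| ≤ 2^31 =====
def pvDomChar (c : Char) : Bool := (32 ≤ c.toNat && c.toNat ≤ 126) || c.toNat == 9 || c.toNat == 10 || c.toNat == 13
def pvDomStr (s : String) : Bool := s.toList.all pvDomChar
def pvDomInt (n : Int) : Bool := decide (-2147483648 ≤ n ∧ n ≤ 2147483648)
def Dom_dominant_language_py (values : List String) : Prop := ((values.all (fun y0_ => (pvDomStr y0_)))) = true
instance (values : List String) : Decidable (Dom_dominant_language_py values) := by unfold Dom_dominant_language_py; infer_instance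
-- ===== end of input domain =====

-- B drops A's counts dict and the sort of items: it scans the cleaned occurrences with a
-- best-so-far accumulator, pairing each occurrence with list.count (alternative; not faster).

-- ===== PORT A =====
def dominant_language_py (values : List String) : String :=
  let cleaned := (values.filter (fun v => decide (v ≠ "") && decide (PySem.Str.strip v ≠ ""))).map
    (fun value => PySem.Str.strip value)
  if cleaned = [] then "unknown"
  else
    let counts := cleaned.foldl (fun d lang => d.insert lang (d.getD lang 0 + 1))
      (PySem.Dict.empty : PySem.Dict String Int)
    -- sorted(counts.items(), key=lambda item: (-item[1], item[0]))[0][0]; the index 0 is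
    -- always in range here (counts is nonempty), so the pyGetD default is never used
    (PySem.List.pyGetD
      (PySem.List.sorted2 counts.items (fun item => -item.2) (fun item => item.1)) 0 ("", 0)).1

-- ===== PORT B =====
def dominant_language_py_alt (values : List String) : String :=
  let cleaned := values.foldl (fun acc value =>
    let s := PySem.Str.strip value
    if s ≠ "" then acc ++ [s] else acc) []
  let best := cleaned.foldl (fun (b : Option (String × Int)) lang =>
    let c : Int := PySem.List.count cleaned lang
    match b with
    | none => some (lang, c)
    | some (bl, bc) =>
        if bc < c ∨ (c = bc ∧ lang < bl) then some (lang, c) else some (bl, bc)) none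
  match best with
  | none => "unknown"
  | some (bl, _) => bl

-- ===== PRECONDITION & SPEC =====
def Spec_dominant_language_py (values : List String) (out : String) : Prop := out = dominant_language_py_alt values
instance (values : List String) (out : String) : Decidable (Spec_dominant_language_py values out) := by unfold Spec_dominant_language_py; infer_instance

-- ===== CLAIM (what is proved, stated in full; the proofs are below) =====
def Claim_equal_dominant_language_py : Prop := ∀ (values : List String), Dom_dominant_language_py values → Spec_dominant_language_py values (dominant_language_py values)

-- ===== LEMMAS AND PROOFS =====

-- the strict 'better' order both scans use: higher count first, then smaller name
def pvLt (x y : String × Int) : Prop := y.2 < x.2 ∨ (x.2 = y.2 ∧ x.1 < y.1)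

-- Bool form of pvLt, used inside the fold functions (no extra Decidable instance needed)
def pvLtb (x y : String × Int) : Bool :=
  decide (y.2 < x.2) || (decide (x.2 = y.2) && decide (x.1 < y.1))

theorem pvLtb_iff (x y : String × Int) : pvLtb x y = true ↔ pvLt x y := by
  simp [pvLtb, pvLt]

theorem pvLt_irrefl (x : String × Int) : ¬ pvLt x x := by
  unfold pvLt
  rintro (h | ⟨-, h⟩)
  · omega
  · exact lt_irrefl _ h

theorem pvLt_trans {x y z : String × Int} (h1 : pvLt x y) (h2 : pvLt y z) : pvLt x z := by
  unfold pvLt at *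
  rcases h1 with h1 | ⟨e1, s1⟩ <;> rcases h2 with h2 | ⟨e2, s2⟩
  · exact Or.inl (by omega)
  · exact Or.inl (by omega)
  · exact Or.inl (by omega)
  · exact Or.inr ⟨by omega, lt_trans s1 s2⟩

theorem pvLt_of_not_lt_of_lt {x a m : String × Int} (h1 : ¬ pvLt x a) (h2 : pvLt x m) :
    pvLt a m := by
  unfold pvLt at *
  have hc : ¬ a.2 < x.2 := fun hh => h1 (Or.inl hh)
  rcases h2 with h2 | ⟨e2, s2⟩
  · exact Or.inl (by omega)
  · by_cases he : x.2 = a.2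
    · have hs : ¬ x.1 < a.1 := fun hh => h1 (Or.inr ⟨he, hh⟩)
      exact Or.inr ⟨by omega, lt_of_le_of_lt (not_lt.mp hs) s2⟩
    · exact Or.inl (by omega)

theorem pvLt_antisymm {x y : String × Int} (h1 : ¬ pvLt x y) (h2 : ¬ pvLt y x) : x = y := by
  unfold pvLt at *
  have hc1 : ¬ y.2 < x.2 := fun hh => h1 (Or.inl hh)
  have hc2 : ¬ x.2 < y.2 := fun hh => h2 (Or.inl hh)
  have he : x.2 = y.2 := by omega
  have hs1 : ¬ x.1 < y.1 := fun hh => h1 (Or.inr ⟨he, hh⟩)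
  have hs2 : ¬ y.1 < x.1 := fun hh => h2 (Or.inr ⟨he.symm, hh⟩)
  exact Prod.ext (le_antisymm (not_lt.mp hs2) (not_lt.mp hs1)) he

-- the best-so-far fold computes a minimum: its result is in the list and nothing beats it
theorem pv_fold_min_spec (l : List (String × Int)) (a : String × Int) :
    l.foldl (fun y x => if pvLtb x y then x else y) a ∈ a :: l ∧
      ∀ x ∈ a :: l, ¬ pvLt x (l.foldl (fun y x => if pvLtb x y then x else y) a) := by
  induction l generalizing a with
  | nil => exact ⟨List.mem_singleton.mpr rfl, by simpa using pvLt_irrefl a⟩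
  | cons x xs ih =>
    simp only [List.foldl_cons]
    obtain ⟨hmem, hbest⟩ := ih (if pvLtb x a then x else a)
    constructor
    · rcases List.mem_cons.mp hmem with h | h
      · rw [h]; split_ifs <;> simp
      · simp [h]
    · intro y hy
      rcases List.mem_cons.mp hy with hya | hy'
      · -- y = a
        rw [hya]
        by_cases hxa : pvLtb x a = true
        · have hx := hbest _ (List.mem_cons_self)
          rw [if_pos hxa] at hx ⊢
          exact fun ha => hx (pvLt_trans ((pvLtb_iff x a).mp hxa) ha)
        · have := hbest _ (List.mem_cons_self)
          rwa [if_neg hxa] at this ⊢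
      · rcases List.mem_cons.mp hy' with hyx | hyxs
        · -- y = x
          rw [hyx]
          by_cases hxa : pvLtb x a = true
          · have := hbest _ (List.mem_cons_self)
            rwa [if_pos hxa] at this ⊢
          · have ha := hbest _ (List.mem_cons_self)
            rw [if_neg hxa] at ha ⊢
            exact fun hx => ha (pvLt_of_not_lt_of_lt
              (fun hh => hxa ((pvLtb_iff x a).mpr hh)) hx)
        · -- y ∈ xs
          have := hbest _ (List.mem_cons_of_mem _ hyxs)
          split_ifs at this ⊢ <;> exact this

-- head of insertBy: x goes first iff it is before the old head
theorem pv_head?_insertBy {α : Type} (before : α → α → Bool) (x : α) (ys : List α) :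
    (PySem.List.insertBy before x ys).head? =
      some (match ys.head? with | none => x | some y => if before x y then x else y) := by
  cases ys <;> simp [PySem.List.insertBy] <;> split <;> simp_all

-- head of the insertBy fold = an option-valued best-so-far fold
theorem pv_head?_foldl_insertBy {α : Type} (before : α → α → Bool) (l : List α) (init : List α) :
    (l.foldl (fun acc x => PySem.List.insertBy before x acc) init).head? =
      l.foldl (fun (b : Option α) x =>
        some (match b with | none => x | some y => if before x y then x else y)) init.head? := by
  induction l generalizing init with
  | nil => rfl
  | cons x xs ih =>
    simp only [List.foldl_cons]
    rw [ih, pv_head?_insertBy]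

theorem pv_foldl_some {α : Type} (before : α → α → Bool) (rest : List α) (a : α) :
    rest.foldl (fun (b : Option α) x =>
        some (match b with | none => x | some y => if before x y then x else y)) (some a) =
      some (rest.foldl (fun y x => if before x y then x else y) a) := by
  induction rest generalizing a with
  | nil => rfl
  | cons x xs ih => simp only [List.foldl_cons]; rw [ih]

-- sorted2's lexicographic comparator, specialised to key (-count, name), IS pvLt
theorem pv_before_eq (y x : String × Int) :
    (if (decide ((-x.2 : Int) < -y.2) || (!decide ((-y.2 : Int) < -x.2) && decide (x.1 < y.1))) = true
      then x else y) =
    (if pvLtb x y then x else y) := by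
  simp only [pvLtb]
  by_cases h1 : y.2 < x.2 <;> by_cases h2 : x.2 = y.2 <;> by_cases h3 : x.1 < y.1 <;>
    simp [h1, h2, h3] <;> omega

-- A's head-of-sorted is the pvLt-minimum fold over the items
theorem pv_A_eq_min (a0 : String × Int) (rest : List (String × Int)) :
    PySem.List.pyGetD
        (PySem.List.sorted2 (a0 :: rest) (fun item => -item.2) (fun item => item.1)) 0 ("", 0) =
      rest.foldl (fun y x => if pvLtb x y then x else y) a0 := by
  have hh : (PySem.List.sorted2 (a0 :: rest) (fun item => -item.2) (fun item => item.1)).head? =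
      some (rest.foldl (fun y x => if pvLtb x y then x else y) a0) := by
    show (((a0 :: rest).foldl (fun acc x => PySem.List.insertBy _ x acc) [])).head? = _
    rw [pv_head?_foldl_insertBy]
    simp only [List.foldl_cons, List.head?_nil]
    rw [pv_foldl_some]
    congr 1
    apply PySem.List.foldl_congr_mem
    intro y x _
    exact pv_before_eq y x
  rcases hs : PySem.List.sorted2 (a0 :: rest) (fun item => -item.2) (fun item => item.1)
      with _ | ⟨m, t⟩
  · rw [hs] at hh; simp at hh
  · rw [hs] at hh
    simp only [List.head?_cons, Option.some.injEq] at hh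
    simp [PySem.List.pyGetD_zero, hh]

-- B's option scan with an Option accumulator, once started, is the pvLt-minimum pair fold
theorem pv_optfold_pair (l : List (String × Int)) (a : String × Int) :
    l.foldl (fun (b : Option (String × Int)) x =>
        match b with
        | none => some x
        | some p => if pvLtb x p then some x else some p) (some a) =
      some (l.foldl (fun y x => if pvLtb x y then x else y) a) := by
  induction l generalizing a with
  | nil => rfl
  | cons x xs ih =>
    simp only [List.foldl_cons]
    by_cases h : pvLtb x a = true
    · rw [if_pos h, if_pos h]; exact ih x
    · rw [if_neg h, if_neg h]; exact ih a

-- B's option-valued scan over a nonempty list is the pvLt-minimum fold over the paired list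
theorem pv_B_eq_min (cl : List String) (c0 : String) (cs : List String) (hcl : cl = c0 :: cs) :
    cl.foldl (fun (b : Option (String × Int)) lang =>
        match b with
        | none => some (lang, (PySem.List.count cl lang : Int))
        | some (bl, bc) =>
            if bc < (PySem.List.count cl lang : Int) ∨
                ((PySem.List.count cl lang : Int) = bc ∧ lang < bl)
            then some (lang, (PySem.List.count cl lang : Int)) else some (bl, bc)) none =
      some ((cs.map (fun k => (k, (List.count k cl : Int)))).foldl
        (fun y x => if pvLtb x y then x else y) (c0, (List.count c0 cl : Int))) := by
  have h1 : cl.foldl (fun (b : Option (String × Int)) lang =>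
        match b with
        | none => some (lang, (PySem.List.count cl lang : Int))
        | some (bl, bc) =>
            if bc < (PySem.List.count cl lang : Int) ∨
                ((PySem.List.count cl lang : Int) = bc ∧ lang < bl)
            then some (lang, (PySem.List.count cl lang : Int)) else some (bl, bc)) none =
      cl.foldl (fun (b : Option (String × Int)) lang =>
        match b with
        | none => some (lang, (List.count lang cl : Int))
        | some p => if pvLtb (lang, (List.count lang cl : Int)) p
            then some (lang, (List.count lang cl : Int)) else some p) none := by
    apply PySem.List.foldl_congr_mem
    intro b lang _
    cases b with
    | none => simp [PySem.List.count_eq]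
    | some p =>
      rcases p with ⟨bl, bc⟩
      simp only [PySem.List.count_eq]
      by_cases h : bc < (List.count lang cl : Int) ∨
          ((List.count lang cl : Int) = bc ∧ lang < bl)
      · rw [if_pos h, if_pos ((pvLtb_iff (lang, (List.count lang cl : Int)) (bl, bc)).mpr
          (show pvLt (lang, (List.count lang cl : Int)) (bl, bc) from h))]
      · rw [if_neg h, if_neg (fun hh =>
          (show ¬ pvLt (lang, (List.count lang cl : Int)) (bl, bc) from h)
            ((pvLtb_iff (lang, (List.count lang cl : Int)) (bl, bc)).mp hh))]
  have h2 : cl.foldl (fun (b : Option (String × Int)) lang =>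
        match b with
        | none => some (lang, (List.count lang cl : Int))
        | some p => if pvLtb (lang, (List.count lang cl : Int)) p
            then some (lang, (List.count lang cl : Int)) else some p) none =
      (cl.map (fun k => (k, (List.count k cl : Int)))).foldl
        (fun (b : Option (String × Int)) x =>
          match b with
          | none => some x
          | some p => if pvLtb x p then some x else some p) none := by
    rw [List.foldl_map]
  rw [h1, h2, hcl, List.map_cons, List.foldl_cons]
  exact pv_optfold_pair _ _

-- ===== VERDICT (by name: the statement is the Claim_ definition above) =====
theorem dominant_language_py_spec : Claim_equal_dominant_language_py := by
  intro values _hdom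
  unfold Spec_dominant_language_py dominant_language_py dominant_language_py_alt
  simp only []
  -- B's accumulator loop builds exactly A's filtered-and-stripped list
  have hfold : values.foldl (fun acc value =>
      let s := PySem.Str.strip value
      if s ≠ "" then acc ++ [s] else acc) [] =
      (values.filter (fun v => decide (v ≠ "") && decide (PySem.Str.strip v ≠ ""))).map
        (fun value => PySem.Str.strip value) := by
    have h1 : (values.foldl (fun acc value =>
        let s := PySem.Str.strip value
        if s ≠ "" then acc ++ [s] else acc) []) =
        values.foldl (fun acc value =>
          if (decide (value ≠ "") && decide (PySem.Str.strip value ≠ "")) = true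
          then acc ++ [PySem.Str.strip value] else acc) [] := by
      apply PySem.List.foldl_congr_mem
      intro acc v _
      by_cases hv : PySem.Str.strip v ≠ ""
      · have hv' : v ≠ "" := by intro h; subst h; exact hv (by decide)
        simp [hv, hv']
      · simp [hv]
    rw [h1, PySem.List.foldl_append_if]
    simp
  rw [hfold]
  set cleaned := (values.filter (fun v => decide (v ≠ "") && decide (PySem.Str.strip v ≠ ""))).map
    (fun value => PySem.Str.strip value) with hcl
  by_cases hc : cleaned = []
  · simp [hc]
  · simp only [if_neg hc]
    rw [PySem.Dict.foldl_insert_getD_add_one_eq_counter]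
    obtain ⟨c0, cs, hcc⟩ := List.exists_cons_of_ne_nil hc
    -- A's side
    have hitems : (PySem.Dict.counter cleaned).items =
        (c0, (List.count c0 cleaned : Int)) ::
          (PySem.Set.discard (PySem.Set.ofList cs) c0).map
            (fun k => (k, (List.count k cleaned : Int))) := by
      rw [PySem.Dict.items_counter, hcc, PySem.Set.ofList_cons]
      simp [← hcc]
    rw [hitems, pv_A_eq_min, pv_B_eq_min cleaned c0 cs hcc]
    -- both sides are pvLt-minima of lists with the same members: they are equal
    set h := fun k => (k, (List.count k cleaned : Int)) with hh
    obtain ⟨mA_mem, mA_best⟩ := pv_fold_min_spec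
      ((PySem.Set.discard (PySem.Set.ofList cs) c0).map h) (h c0)
    obtain ⟨mB_mem, mB_best⟩ := pv_fold_min_spec (cs.map h) (h c0)
    set mA := ((PySem.Set.discard (PySem.Set.ofList cs) c0).map h).foldl
      (fun y x => if pvLtb x y then x else y) (h c0) with hmA
    set mB := (cs.map h).foldl (fun y x => if pvLtb x y then x else y) (h c0) with hmB
    -- same member sets: both lists of pairs are h-images of lists with the same members
    have hAmem : ∀ z, z ∈ h c0 :: (PySem.Set.discard (PySem.Set.ofList cs) c0).map h ↔
        ∃ k, k ∈ c0 :: cs ∧ z = h k := by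
      intro z
      simp only [List.mem_cons, List.mem_map]
      constructor
      · rintro (rfl | ⟨k, hk, rfl⟩)
        · exact ⟨c0, by simp⟩
        · exact ⟨k, Or.inr ((PySem.Set.mem_ofList cs k).mp
            (((PySem.Set.mem_discard _ _ _).mp hk).1)), rfl⟩
      · rintro ⟨k, (rfl | hk), rfl⟩
        · exact Or.inl rfl
        · by_cases hkc : k = c0
          · exact Or.inl (by rw [hkc])
          · exact Or.inr ⟨k, (PySem.Set.mem_discard _ _ _).mpr
              ⟨(PySem.Set.mem_ofList cs k).mpr hk, hkc⟩, rfl⟩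
    have hBmem : ∀ z, z ∈ h c0 :: cs.map h ↔ ∃ k, k ∈ c0 :: cs ∧ z = h k := by
      intro z
      simp only [List.mem_cons, List.mem_map]
      constructor
      · rintro (rfl | ⟨k, hk, rfl⟩)
        · exact ⟨c0, by simp⟩
        · exact ⟨k, Or.inr hk, rfl⟩
      · rintro ⟨k, (rfl | hk), rfl⟩
        · exact Or.inl rfl
        · exact Or.inr ⟨k, hk, rfl⟩
    have hBA : ¬ pvLt mB mA := mA_best _ ((hAmem mB).mpr ((hBmem mB).mp mB_mem))
    have hAB : ¬ pvLt mA mB := mB_best _ ((hBmem mA).mpr ((hAmem mA).mp mA_mem))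
    rw [pvLt_antisymm hAB hBA, show mB = (mB.1, mB.2) from rfl]
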